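-- pv_equiv track=rewrite | github.com/simsekergun/Resolution | Attention.py | monomials
-- ===== SOURCE A (Python) =====
-- def create_indices(n_vars, degree):
--   idx = [[j] for j in range(n_vars)]
--   s = idx.copy()
--   for d in range(2, degree+1):
--     new_s = [i + [j] for i in s for j in range(min(i)+1)]
--     s = new_s
--     for k in range(len(new_s)):
--       idx.append(new_s[k])
--   return idx
--
-- def monomials(x, degree):
--   x_monomials = []
--   for idx in create_indices(len(x), degree):
--     x_prod = 1
--     for i in idx:
--       x_prod *= x[i]
--     x_monomials.append(x_prod)
--   return x_monomials
-- ===== SOURCE B (Python) =====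
-- def monomials(x, degree):
--     # Incremental: each degree-d monomial is built from its degree-(d-1) parent
--     # by one multiplication, carrying (last index, product) per entry.
--     level = [(j, v) for j, v in enumerate(x)]
--     out = [p for _, p in level]
--     d = 2
--     while d <= degree:
--         level = [(j, p * x[j]) for (m, p) in level for j in range(m + 1)]
--         out.extend(p for _, p in level)
--         d += 1
--     return out
-- ===== Notes on version B (the rewrite author's own statement) =====
-- stated objective: alternative
-- what changed: Instead of regenerating every index tuple and then multiplying each full tuple from scratch, B carries (last index, product) per monomial and extends each level by one multiplication per child, so index lists are never materialised; intended as faster per monomial (one multiply vs d multiplies plus a min() scan), measured ~2x in a timing run but unconfirmed at the largest size (output size dominates both).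
import Mathlib
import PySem

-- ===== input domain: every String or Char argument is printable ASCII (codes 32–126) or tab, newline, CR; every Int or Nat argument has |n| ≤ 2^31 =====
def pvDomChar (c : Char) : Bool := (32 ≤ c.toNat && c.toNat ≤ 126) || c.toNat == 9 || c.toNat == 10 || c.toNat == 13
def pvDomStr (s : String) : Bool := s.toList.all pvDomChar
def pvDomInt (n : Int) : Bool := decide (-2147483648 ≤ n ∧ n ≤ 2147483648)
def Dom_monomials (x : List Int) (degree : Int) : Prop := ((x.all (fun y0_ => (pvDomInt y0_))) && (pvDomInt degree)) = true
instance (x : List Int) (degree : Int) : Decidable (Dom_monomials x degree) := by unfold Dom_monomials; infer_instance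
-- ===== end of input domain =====

-- B builds each monomial product incrementally from its parent (product = parent_product * x[j]) instead of
-- recomputing every product from its full index list; a structurally different, per-monomial-cheaper algorithm.


-- ===== PORT A =====
-- min(i); in A's use i is always nonempty, so the `.getD 0` branch is never reached
def pyMinD (l : List Int) : Int := (PySem.List.min? l (fun y => y)).getD 0

def createIndices (nVars : Int) (degree : Int) : List (List Int) :=
  let idx := (PySem.List.pyRange 0 nVars 1).map (fun j => [j])
  let s := idx
  let st := (PySem.List.pyRange 2 (degree + 1) 1).foldl
    (fun (st : List (List Int) × List (List Int)) _d =>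
      let new_s := st.2.flatMap (fun i =>
        (PySem.List.pyRange 0 (pyMinD i + 1) 1).map (fun j => i ++ [j]))
      -- for k in range(len(new_s)): idx.append(new_s[k])
      let idx' := (PySem.List.pyRange 0 (new_s.length : Int) 1).foldl
        (fun acc k => acc ++ [PySem.List.pyGetD new_s k []]) st.1
      (idx', new_s)) (idx, s)
  st.1

def monomials (x : List Int) (degree : Int) : List Int :=
  (createIndices (x.length : Int) degree).foldl
    (fun acc idx =>
      let xProd := idx.foldl (fun p i => p * PySem.List.pyGetD x i 0) 1
      acc ++ [xProd]) []

-- ===== PORT B =====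
def monomials_alt (x : List Int) (degree : Int) : List Int :=
  let level : List (Int × Int) := PySem.List.enumerate x
  let out := level.map Prod.snd
  ((PySem.List.pyRange 2 (degree + 1) 1).foldl
    (fun (st : List Int × List (Int × Int)) _d =>
      let level' := st.2.flatMap (fun mp =>
        (PySem.List.pyRange 0 (mp.1 + 1) 1).map (fun j => (j, mp.2 * PySem.List.pyGetD x j 0)))
      (st.1 ++ level'.map Prod.snd, level')) (out, level)).1

-- ===== PRECONDITION & SPEC =====
def Spec_monomials (x : List Int) (degree : Int) (out : List Int) : Prop := out = monomials_alt x degree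
instance (x : List Int) (degree : Int) (out : List Int) : Decidable (Spec_monomials x degree out) := by unfold Spec_monomials; infer_instance

-- ===== CLAIM (what is proved, stated in full; the proofs are below) =====
def Claim_equal_monomials : Prop := ∀ (x : List Int) (degree : Int), Dom_monomials x degree → Spec_monomials x degree (monomials x degree)

-- ===== LEMMAS AND PROOFS =====

-- the product of x over an index list, as A's inner loop computes it
def prodx (x : List Int) (i : List Int) : Int :=
  i.foldl (fun p j => p * PySem.List.pyGetD x j 0) 1

-- (min, product) of an index list: the data B carries per entry
def keyf (x : List Int) (i : List Int) : Int × Int := (pyMinD i, prodx x i)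

theorem pyMinD_append_singleton (a : Int) (t : List Int) (j : Int) (hj : j ≤ pyMinD (a :: t)) :
    pyMinD ((a :: t) ++ [j]) = j := by
  have h1 : pyMinD (a :: t) = t.foldl min a := by
    simp [pyMinD, PySem.List.min?_id_cons]
  have h2 : ((a :: t) ++ [j]) = a :: (t ++ [j]) := by simp
  rw [h2]
  simp [pyMinD, PySem.List.min?_id_cons, List.foldl_append]
  rw [h1] at hj
  omega

theorem prodx_append_singleton (x : List Int) (i : List Int) (j : Int) :
    prodx x (i ++ [j]) = prodx x i * PySem.List.pyGetD x j 0 := by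
  simp [prodx, List.foldl_append]

theorem keyf_level (x : List Int) (i : List Int) (hne : i ≠ []) :
    ((PySem.List.pyRange 0 (pyMinD i + 1) 1).map (fun j => i ++ [j])).map (keyf x)
      = (PySem.List.pyRange 0 ((keyf x i).1 + 1) 1).map
          (fun j => (j, (keyf x i).2 * PySem.List.pyGetD x j 0)) := by
  obtain ⟨a, t, rfl⟩ : ∃ a t, i = a :: t := by
    cases i with
    | nil => exact absurd rfl hne
    | cons a t => exact ⟨a, t, rfl⟩
  rw [List.map_map]
  refine List.map_congr_left ?_
  intro j hj
  rw [PySem.List.mem_pyRange_one] at hj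
  simp only [Function.comp, keyf]
  rw [pyMinD_append_singleton a t j (by omega), prodx_append_singleton]

-- A's inner append loop is idx ++ new_s
theorem idx_loop_eq (new_s : List (List Int)) (acc : List (List Int)) :
    (PySem.List.pyRange 0 (new_s.length : Int) 1).foldl
      (fun acc k => acc ++ [PySem.List.pyGetD new_s k []]) acc = acc ++ new_s := by
  rw [PySem.List.foldl_append_singleton_eq_map, PySem.List.map_pyGetD_pyRange_zero']

theorem snd_map_keyf (x : List Int) (l : List (List Int)) :
    (l.map (keyf x)).map Prod.snd = l.map (prodx x) := by
  rw [List.map_map]; rfl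

-- loop invariant: B's state is the image of A's state under (prodx, keyf)
theorem loop_invariant (x : List Int) (r : List Int) (idx s : List (List Int))
    (hs : ∀ i ∈ s, i ≠ []) :
    (r.foldl
      (fun (st : List Int × List (Int × Int)) _d =>
        let level' := st.2.flatMap (fun mp =>
          (PySem.List.pyRange 0 (mp.1 + 1) 1).map (fun j => (j, mp.2 * PySem.List.pyGetD x j 0)))
        (st.1 ++ level'.map Prod.snd, level')) (idx.map (prodx x), s.map (keyf x)))
    = (let st := r.foldl
        (fun (st : List (List Int) × List (List Int)) _d =>
          let new_s := st.2.flatMap (fun i =>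
            (PySem.List.pyRange 0 (pyMinD i + 1) 1).map (fun j => i ++ [j]))
          let idx' := (PySem.List.pyRange 0 (new_s.length : Int) 1).foldl
            (fun acc k => acc ++ [PySem.List.pyGetD new_s k []]) st.1
          (idx', new_s)) (idx, s)
       (st.1.map (prodx x), st.2.map (keyf x))) := by
  induction r generalizing idx s with
  | nil => simp
  | cons d r ih =>
    simp only [List.foldl_cons]
    have hmap : (s.flatMap (fun i =>
        (PySem.List.pyRange 0 (pyMinD i + 1) 1).map (fun j => i ++ [j]))).map (keyf x)
        = (s.map (keyf x)).flatMap (fun mp =>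
            (PySem.List.pyRange 0 (mp.1 + 1) 1).map
              (fun j => (j, mp.2 * PySem.List.pyGetD x j 0))) := by
      rw [List.map_flatMap, List.flatMap_map]
      exact List.flatMap_congr (fun i hi => keyf_level x i (hs i hi))
    rw [idx_loop_eq, ← hmap, snd_map_keyf, ← List.map_append]
    have hne' : ∀ i ∈ s.flatMap (fun i =>
        (PySem.List.pyRange 0 (pyMinD i + 1) 1).map (fun j => i ++ [j])), i ≠ [] := by
      intro i hi
      rw [List.mem_flatMap] at hi
      obtain ⟨a, _, hi⟩ := hi
      rw [List.mem_map] at hi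
      obtain ⟨j, _, rfl⟩ := hi
      simp
    exact ih _ _ hne'

theorem monomials_spec_aux (x : List Int) (degree : Int) :
    monomials x degree = monomials_alt x degree := by
  unfold monomials monomials_alt createIndices
  simp only []
  rw [PySem.List.foldl_append_singleton_eq_map]
  -- initial states correspond
  have hinit_idx : PySem.List.enumerate x
      = ((PySem.List.pyRange 0 (x.length : Int) 1).map (fun j => [j])).map (keyf x) := by
    rw [PySem.List.enumerate_eq_map_pyRange x 0, List.map_map]
    refine List.map_congr_left ?_
    intro j hj
    simp only [Function.comp, keyf, pyMinD, prodx, PySem.List.min?_id_cons]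
    simp
  have hne : ∀ i ∈ (PySem.List.pyRange 0 (x.length : Int) 1).map (fun j => [j]), i ≠ [] := by
    intro i hi
    rw [List.mem_map] at hi
    obtain ⟨j, _, rfl⟩ := hi
    simp
  rw [hinit_idx, snd_map_keyf,
    loop_invariant x (PySem.List.pyRange 2 (degree + 1) 1)
      ((PySem.List.pyRange 0 (x.length : Int) 1).map (fun j => [j]))
      ((PySem.List.pyRange 0 (x.length : Int) 1).map (fun j => [j])) hne]
  rfl

-- ===== VERDICT (by name: the statement is the Claim_ definition above) =====
theorem monomials_spec : Claim_equal_monomials := by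
  intro x degree _
  unfold Spec_monomials
  exact monomials_spec_aux x degree
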